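-- pv_equiv track=rewrite | github.com/daniel-reich/ubiquitous-fiesta | JsisSTswerLQqJ73X_19.py | priority_sort
-- ===== SOURCE A (Python) =====
-- def priority_sort(lst, s):
--   l=[]
--   for x in lst:
--     if x in s:
--       l.append(x)
--   for y in l:
--     lst.remove(y)
--   l.sort()
--   lst.sort()
--   for z in lst:
--     l.append(z)
--   return l
-- ===== SOURCE B (Python) =====
-- def priority_sort(lst, s):
--     ordered = sorted(lst)
--     result = [x for x in ordered if x in s] + [x for x in ordered if x not in s]
--     lst[:] = [x for x in ordered if x not in s]
--     return result
-- ===== Notes on version B (the rewrite author's own statement) =====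
-- stated objective: faster
-- what changed: B sorts the whole list once and stably partitions the sorted list into members of s then non-members, replacing A's build-matching-loop, element-by-element list.remove, two separate sorts and append loop; B also assigns lst[:] to reproduce A's in-place mutation.
import Mathlib
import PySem

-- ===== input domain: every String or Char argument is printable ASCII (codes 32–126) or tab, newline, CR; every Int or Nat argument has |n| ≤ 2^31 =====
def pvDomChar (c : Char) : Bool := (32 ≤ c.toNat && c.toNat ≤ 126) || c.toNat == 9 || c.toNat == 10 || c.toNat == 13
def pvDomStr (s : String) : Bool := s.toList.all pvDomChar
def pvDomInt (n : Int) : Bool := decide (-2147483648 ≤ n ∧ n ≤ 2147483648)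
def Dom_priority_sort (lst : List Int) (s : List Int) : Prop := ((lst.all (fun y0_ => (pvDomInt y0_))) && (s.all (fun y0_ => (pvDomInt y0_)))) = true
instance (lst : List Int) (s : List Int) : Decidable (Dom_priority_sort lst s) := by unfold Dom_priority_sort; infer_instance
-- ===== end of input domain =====

-- B replaces A's partition/remove/two-sort/concatenate pipeline by ONE global sort followed by a
-- stable partition of the sorted list; equivalence proved for the RETURN value (A mutates lst in
-- place — B's Python reproduces that mutation, the theorems here are about the returned list).


-- ===== PORT A =====
-- lst.remove(y): PySem.List.remove? (none = ValueError); in A every removed y was collected from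
-- lst itself, so remove always succeeds and the .getD totalisation is never reached (proved below).
def priority_sort (lst : List Int) (s : List Int) : List Int :=
  let l := lst.foldl (fun acc x => if x ∈ s then acc ++ [x] else acc) []
  let lst1 := l.foldl (fun acc y => (PySem.List.remove? acc y).getD acc) lst
  let l1 := PySem.List.sorted l (fun x => x) false
  let lst2 := PySem.List.sorted lst1 (fun x => x) false
  lst2.foldl (fun acc z => acc ++ [z]) l1

-- ===== PORT B =====
def priority_sort_alt (lst : List Int) (s : List Int) : List Int :=
  let ordered := PySem.List.sorted lst (fun x => x) false
  (ordered.filter (fun x => decide (x ∈ s))) ++ (ordered.filter (fun x => decide (x ∉ s)))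

-- ===== PRECONDITION & SPEC =====
def Spec_priority_sort (lst : List Int) (s : List Int) (out : List Int) : Prop := out = priority_sort_alt lst s
instance (lst : List Int) (s : List Int) (out : List Int) : Decidable (Spec_priority_sort lst s out) := by unfold Spec_priority_sort; infer_instance

-- ===== CLAIM (what is proved, stated in full; the proofs are below) =====
def Claim_equal_priority_sort : Prop := ∀ (lst : List Int) (s : List Int), Dom_priority_sort lst s → Spec_priority_sort lst s (priority_sort lst s)

-- ===== LEMMAS AND PROOFS =====

-- The remove-loop step of A's port.
def pvStep (acc : List Int) (y : Int) : List Int := (PySem.List.remove? acc y).getD acc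

-- Removing elements that all satisfy p walks past a head that does not satisfy p.
theorem pvStep_cons (acc : List Int) (x y : Int) (hne : x ≠ y) :
    pvStep (x :: acc) y = x :: pvStep acc y := by
  unfold pvStep
  rw [PySem.List.remove?_cons_of_ne acc hne]
  cases PySem.List.remove? acc y <;> rfl

theorem pvStep_foldl_cons (p : Int → Bool) (ys : List Int) :
    ∀ (acc : List Int) (x : Int), (∀ y ∈ ys, p y = true) → p x = false →
      ys.foldl pvStep (x :: acc) = x :: ys.foldl pvStep acc := by
  induction ys with
  | nil => intro acc x _ _; rfl
  | cons y t ih =>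
    intro acc x hall hx
    have hy : p y = true := hall y (List.mem_cons_self)
    have hne : x ≠ y := by intro h; rw [h, hy] at hx; exact absurd hx (by simp)
    simp only [List.foldl_cons, pvStep_cons acc x y hne]
    exact ih (pvStep acc y) x (fun z hz => hall z (List.mem_cons_of_mem _ hz)) hx

-- Removing, in order, the p-filtered occurrences of lst from lst leaves exactly the ¬p elements.
theorem pvRemoveAll (p : Int → Bool) (lst : List Int) :
    (lst.filter p).foldl pvStep lst = lst.filter (fun x => !p x) := by
  induction lst with
  | nil => rfl
  | cons x t ih =>
    by_cases hx : p x = true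
    · have : (x :: t).filter p = x :: t.filter p := by simp [hx]
      rw [this]
      simp only [List.foldl_cons, pvStep, PySem.List.remove?_cons_self, Option.getD_some]
      simpa [List.filter_cons, hx] using ih
    · have hx' : p x = false := by simpa using hx
      have : (x :: t).filter p = t.filter p := by simp [hx']
      rw [this, pvStep_foldl_cons p (t.filter p) t x (by simp) hx']
      simp [hx', ih]

-- Filtering a sorted list is the sort of the filtered list (stable sort, identity key).
theorem pvFilterSorted (q : Int → Bool) (lst : List Int) :
    (PySem.List.sorted lst (fun x => x) false).filter q
      = PySem.List.sorted (lst.filter q) (fun x => x) false := by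
  apply PySem.List.eq_of_perm_of_pairwise_le_of_injective (fun x : Int => x) (fun _ _ h => h)
  · exact ((PySem.List.sorted_perm lst (fun x => x) false).filter q).trans
      (PySem.List.sorted_perm (lst.filter q) (fun x => x) false).symm
  · exact (PySem.List.sorted_pairwise lst (fun x => x)).sublist List.filter_sublist
  · exact PySem.List.sorted_pairwise (lst.filter q) (fun x => x)

-- ===== VERDICT (by name: the statement is the Claim_ definition above) =====
theorem priority_sort_spec : Claim_equal_priority_sort := by
  intro lst s _
  unfold Spec_priority_sort priority_sort priority_sort_alt
  simp only [PySem.List.foldl_append_ite_eq_filter, List.nil_append,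
    PySem.List.foldl_append_singleton_eq_self]
  rw [show (fun acc y => (PySem.List.remove? acc y).getD acc) = pvStep from rfl,
      pvRemoveAll (fun x => decide (x ∈ s)) lst,
      ← pvFilterSorted (fun x => decide (x ∈ s)) lst,
      ← pvFilterSorted (fun x => !decide (x ∈ s)) lst]
  simp [decide_not]
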